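-- pv_equiv track=rewrite | github.com/avk-ho/algorithms-solving | python/valid_starting_city.py | validStartingCity
-- ===== SOURCE A (Python) =====
-- def validStartingCity(distances, fuel, mpg):
--     distances_per_city = [n * mpg for n in fuel]
--     fuel_output = []
--
--     for i in range(len(distances)):
--         distance = distances_per_city[i] - distances[i]
--         fuel_output.append(distance)
--
--     for i in range(len(fuel_output)):
--         start = i
--         fuel_reserve = 0
--         list_from_start = [
--             fuel_output[(start + h) % len(fuel_output)] for h in range(len(fuel_output))]
--
--         for j in list_from_start:
--             fuel_reserve += j
--             if fuel_reserve < 0: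
--                 break
--
--         if fuel_reserve < 0:
--             continue
--         else:
--             return i
-- ===== SOURCE B (Python) =====
-- def validStartingCity(distances, fuel, mpg):
--     # O(n) via prefix sums: the answer is the first index minimizing the
--     # prefix sum of surpluses, provided the total surplus is nonnegative.
--     if not distances:
--         return None
--     surplus = [f * mpg - d for d, f in zip(distances, fuel)]
--     if sum(surplus) < 0:
--         return None
--     best_i, best_p, p = 0, 0, 0
--     for i in range(len(surplus) - 1):
--         p += surplus[i]
--         if p < best_p:
--             best_i, best_p = i + 1, p
--     return best_i
-- ===== Notes on version B (the rewrite author's own statement) =====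
-- stated objective: faster
-- what changed: Replaced the quadratic try-every-start simulation (rebuilding and scanning a rotated list per candidate) by a single O(n) prefix-sum pass: the answer is the first index attaining the minimum prefix sum of the surpluses, valid iff the total surplus is nonnegative.
import Mathlib
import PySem

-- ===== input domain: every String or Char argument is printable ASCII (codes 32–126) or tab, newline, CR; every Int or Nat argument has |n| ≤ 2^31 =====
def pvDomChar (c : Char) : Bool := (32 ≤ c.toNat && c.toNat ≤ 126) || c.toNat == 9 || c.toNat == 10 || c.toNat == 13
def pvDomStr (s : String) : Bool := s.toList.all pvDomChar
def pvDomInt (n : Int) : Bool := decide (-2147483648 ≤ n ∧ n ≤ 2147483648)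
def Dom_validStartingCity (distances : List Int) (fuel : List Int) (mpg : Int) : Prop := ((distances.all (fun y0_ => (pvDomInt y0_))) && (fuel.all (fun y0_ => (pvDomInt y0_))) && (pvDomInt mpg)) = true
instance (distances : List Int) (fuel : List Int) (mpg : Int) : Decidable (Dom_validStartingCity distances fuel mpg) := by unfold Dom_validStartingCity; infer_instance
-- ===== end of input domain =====

-- B replaces A's quadratic try-every-start simulation with one O(n) prefix-sum pass (first argmin of prefix sums).


-- ===== PORT A =====
-- inner loop: fuel_reserve += j; if fuel_reserve < 0: break — returns the final fuel_reserve
def tankRun : List Int → Int → Int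
  | [], acc => acc
  | x :: r, acc => if acc + x < 0 then acc + x else tankRun r (acc + x)

-- list_from_start = [fuel_output[(start + h) % len(fuel_output)] for h in range(len(fuel_output))]
-- (pyGetD default 0 is never used: the modulus index is always in range)
def rotList (fo : List Int) (i : Int) : List Int :=
  (PySem.List.pyRange 0 (fo.length : Int) 1).map
    (fun h => PySem.List.pyGetD fo (PySem.Int.mod (i + h) (fo.length : Int)) 0)

-- the outer 'for i in range(len(fuel_output))' with its early 'return i'
def aSearch (fo : List Int) : List Int → Option Int
  | [] => none
  | i :: rest => if tankRun (rotList fo i) 0 < 0 then aSearch fo rest else some i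

def validStartingCity (distances : List Int) (fuel : List Int) (mpg : Int) : Option Int :=
  let dpc := fuel.map (fun n => n * mpg)
  -- fuel_output loop; pyGetD's default 0 stands for the IndexError Python raises when
  -- len(distances) > len(fuel) — those inputs are excluded by Pre_validStartingCity
  let fo := (PySem.List.pyRange 0 (distances.length : Int) 1).foldl
      (fun acc i => acc ++ [PySem.List.pyGetD dpc i 0 - PySem.List.pyGetD distances i 0]) []
  aSearch fo (PySem.List.pyRange 0 (fo.length : Int) 1)

-- ===== PORT B =====
-- state (best_i, best_p, p); one step of the scan: p += surplus[i]; update argmin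
def bStep (surplus : List Int) (s : Int × Int × Int) (i : Nat) : Int × Int × Int :=
  let p := s.2.2 + surplus.getD i 0
  if p < s.2.1 then ((i : Int) + 1, p, p) else (s.1, s.2.1, p)

def validStartingCity_alt (distances : List Int) (fuel : List Int) (mpg : Int) : Option Int :=
  if distances = [] then none
  else
    let surplus := (distances.zip fuel).map (fun p => p.2 * mpg - p.1)
    if surplus.sum < 0 then none
    else
      let st := (List.range (surplus.length - 1)).foldl (bStep surplus) (0, 0, 0)
      some st.1

-- ===== PRECONDITION & SPEC =====
-- Pre_ excludes exactly the inputs on which A raises IndexError (more distances than fuel entries)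
def Pre_validStartingCity (distances : List Int) (fuel : List Int) (mpg : Int) : Prop :=
  distances.length ≤ fuel.length
instance (distances : List Int) (fuel : List Int) (mpg : Int) : Decidable (Pre_validStartingCity distances fuel mpg) := by unfold Pre_validStartingCity; infer_instance
def pvWitness_validStartingCity : List Int × List Int × Int := ([5, 25, 15, 10, 15], [1, 2, 1, 0, 3], 10)

def Spec_validStartingCity (distances : List Int) (fuel : List Int) (mpg : Int) (out : Option Int) : Prop := out = validStartingCity_alt distances fuel mpg
instance (distances : List Int) (fuel : List Int) (mpg : Int) (out : Option Int) : Decidable (Spec_validStartingCity distances fuel mpg out) := by unfold Spec_validStartingCity; infer_instance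

-- ===== CLAIM (what is proved, stated in full; the proofs are below) =====
def Claim_equal_validStartingCity : Prop := ∀ (distances : List Int) (fuel : List Int) (mpg : Int), Dom_validStartingCity distances fuel mpg → Pre_validStartingCity distances fuel mpg → Spec_validStartingCity distances fuel mpg (validStartingCity distances fuel mpg)

-- ===== LEMMAS AND PROOFS =====

-- prefix sums of the surplus list
def pref (xs : List Int) (k : Nat) : Int := (xs.take k).sum

lemma pref_sub (xs : List Int) {b a : Nat} (h : b ≤ a) :
    ((xs.drop b).take (a - b)).sum = pref xs a - pref xs b := by
  have h1 : xs.take a = xs.take b ++ (xs.drop b).take (a - b) := by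
    rw [← List.take_add]; congr 1; omega
  have := congrArg List.sum h1
  simp [List.sum_append, pref] at *
  omega

lemma drop_sum (xs : List Int) (b : Nat) : (xs.drop b).sum = xs.sum - pref xs b := by
  have h1 : (xs.take b).sum + (xs.drop b).sum = xs.sum := by
    rw [← List.sum_append, List.take_append_drop]
  simp only [pref]
  omega

-- the rotated list A builds is drop ++ take
lemma rot_eq (xs : List Int) (i : Nat) (hi : i < xs.length) :
    rotList xs (i : Int) = xs.drop i ++ xs.take i := by
  unfold rotList
  rw [PySem.List.pyRange_one, List.map_map]
  have hn : (((xs.length : Int)) - 0).toNat = xs.length := by omega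
  rw [hn]
  apply List.ext_getElem
  · simp; omega
  · intro k h1 h2
    have hk : k < xs.length := by simpa using h1
    simp only [List.getElem_map, List.getElem_range, Function.comp_apply]
    have hcast : (i : Int) + ((0 : Int) + (k : Int)) = ((i + k : Nat) : Int) := by push_cast; ring
    rw [hcast, PySem.Int.mod_natCast, PySem.List.pyGetD_natCast]
    have hmodlt : (i + k) % xs.length < xs.length := Nat.mod_lt _ (by omega)
    rw [List.getD_eq_getElem _ _ hmodlt]
    by_cases hcase : k < xs.length - i
    · have hmod : (i + k) % xs.length = i + k := Nat.mod_eq_of_lt (by omega)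
      rw [List.getElem_append_left (by simp; omega)]
      rw [List.getElem_drop]
      congr 1
    · have hmod : (i + k) % xs.length = i + k - xs.length := by
        rw [Nat.mod_eq_sub_mod (by omega), Nat.mod_eq_of_lt (by omega)]
      rw [List.getElem_append_right (by simp; omega)]
      rw [List.getElem_take]
      congr 1
      simp
      omega

-- rotation prefix sums, below and above the wrap point
lemma rotsum_low (xs : List Int) {m k : Nat} (hm : m ≤ xs.length) (hk : k ≤ xs.length - m) :
    ((xs.drop m ++ xs.take m).take k).sum = pref xs (m + k) - pref xs m := by
  rw [List.take_append_of_le_length (by simp; omega)]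
  have := pref_sub xs (show m ≤ m + k by omega)
  simpa [Nat.add_sub_cancel_left] using this

lemma rotsum_high (xs : List Int) {m k : Nat} (hm : m ≤ xs.length)
    (hk1 : xs.length - m ≤ k) (hk2 : k ≤ xs.length) :
    ((xs.drop m ++ xs.take m).take k).sum
      = (xs.sum - pref xs m) + pref xs (k - (xs.length - m)) := by
  rw [List.take_append]
  have h1 : (xs.drop m).take k = xs.drop m := List.take_of_length_le (by simp; omega)
  have h2 : (xs.take m).take (k - (xs.drop m).length) = xs.take (k - (xs.length - m)) := by
    rw [List.take_take]; congr 1; simp; omega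
  rw [h1, h2, List.sum_append, drop_sum]
  rfl

-- the final fuel_reserve is nonnegative iff every prefix sum is
lemma tankRun_nonneg (l : List Int) : ∀ acc : Int, 0 ≤ acc →
    (¬ tankRun l acc < 0 ↔ ∀ k ≤ l.length, 0 ≤ acc + (l.take k).sum) := by
  induction l with
  | nil =>
    intro acc hacc
    simp only [tankRun, List.length_nil, Nat.le_zero, List.take_nil, List.sum_nil, add_zero]
    constructor
    · intro h k _; omega
    · intro h; have := h 0 rfl; omega
  | cons x r ih =>
    intro acc hacc
    simp only [tankRun]
    by_cases hx : acc + x < 0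
    · simp only [if_pos hx]
      constructor
      · intro h; omega
      · intro h
        have := h 1 (by simp)
        simp at this; omega
    · simp only [if_neg hx]
      rw [ih (acc + x) (by omega)]
      constructor
      · intro h k hk
        match k with
        | 0 => simpa
        | k + 1 =>
          have := h k (by simpa using hk)
          simpa [add_assoc] using this
      · intro h k hk
        have := h (k + 1) (by simp; omega)
        simpa [add_assoc] using this

-- fuel_output equals B's surplus list
lemma fo_eq (distances fuel : List Int) (mpg : Int) (h : distances.length ≤ fuel.length) :
    (PySem.List.pyRange 0 (distances.length : Int) 1).foldl
      (fun acc i => acc ++ [PySem.List.pyGetD (fuel.map (fun n => n * mpg)) i 0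
                            - PySem.List.pyGetD distances i 0]) []
    = (distances.zip fuel).map (fun p => p.2 * mpg - p.1) := by
  have hfold := PySem.List.foldl_append_singleton_eq_map
    (fun i => PySem.List.pyGetD (fuel.map (fun n => n * mpg)) i 0 - PySem.List.pyGetD distances i 0)
    (PySem.List.pyRange 0 (distances.length : Int) 1) []
  simp only [List.nil_append] at hfold ⊢
  rw [hfold, PySem.List.pyRange_one]
  have hn : (((distances.length : Int)) - 0).toNat = distances.length := by omega
  rw [hn, List.map_map]
  apply List.ext_getElem
  · simp; omega
  · intro k h1 h2
    have hk : k < distances.length := by simpa using h1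
    have hkf : k < fuel.length := by omega
    simp only [List.getElem_map, List.getElem_range, Function.comp_apply, List.getElem_zip]
    have hcast : ((0 : Int) + (k : Int)) = ((k : Nat) : Int) := by simp
    rw [hcast, PySem.List.pyGetD_natCast, PySem.List.pyGetD_natCast]
    rw [List.getD_eq_getElem _ _ (by simpa using hkf), List.getD_eq_getElem _ _ hk]
    simp

-- invariant of B's scan: best_i is the first argmin of the prefix sums seen so far
lemma bScan_inv (xs : List Int) : ∀ (j : Nat), j < xs.length →
    ∃ b : Nat,
      ((List.range j).foldl (bStep xs) (0, 0, 0)) = ((b : Int), pref xs b, pref xs j) ∧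
      b ≤ j ∧ (∀ k < b, pref xs b < pref xs k) ∧ (∀ k ≤ j, pref xs b ≤ pref xs k) := by
  intro j
  induction j with
  | zero =>
    intro _
    refine ⟨0, by simp [pref], le_refl 0, by omega, ?_⟩
    intro k hk
    interval_cases k
    exact le_refl _
  | succ j ih =>
    intro hj
    obtain ⟨b, hstate, hble, hstrict, hmin⟩ := ih (by omega)
    have hjlt : j < xs.length := by omega
    have hpsucc : pref xs j + xs.getD j 0 = pref xs (j + 1) := by
      rw [List.getD_eq_getElem _ _ hjlt]
      simp only [pref]
      rw [List.sum_take_succ _ _ hjlt]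
    rw [List.range_succ, List.foldl_append, hstate]
    simp only [List.foldl_cons, List.foldl_nil]
    have hbs : bStep xs ((b : Int), pref xs b, pref xs j) j =
        if pref xs (j + 1) < pref xs b then ((j : Int) + 1, pref xs (j + 1), pref xs (j + 1))
        else ((b : Int), pref xs b, pref xs (j + 1)) := by
      simp only [bStep, hpsucc]
    rw [hbs]
    by_cases hcmp : pref xs (j + 1) < pref xs b
    · rw [if_pos hcmp]
      refine ⟨j + 1, by simp, le_refl _, ?_, ?_⟩
      · intro k hk
        have := hmin k (by omega)
        omega
      · intro k hk
        by_cases hkj : k ≤ j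
        · have := hmin k hkj
          omega
        · have : k = j + 1 := by omega
          subst this
          exact le_refl _
    · rw [if_neg hcmp]
      refine ⟨b, rfl, by omega, hstrict, ?_⟩
      intro k hk
      by_cases hkj : k ≤ j
      · exact hmin k hkj
      · have : k = j + 1 := by omega
        subst this
        omega

-- A's outer loop returns none when every candidate fails
lemma aSearch_none (xs : List Int) :
    ∀ (c : Nat) (a : Int), ((xs.length : Int) - a).toNat = c →
    (∀ i : Int, a ≤ i → i < (xs.length : Int) → tankRun (rotList xs i) 0 < 0) →
    aSearch xs (PySem.List.pyRange a (xs.length : Int) 1) = none := by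
  intro c
  induction c with
  | zero =>
    intro a hc _
    rw [PySem.List.pyRange_one_eq_nil (by omega)]
    rfl
  | succ c ih =>
    intro a hc hall
    have ha : a < (xs.length : Int) := by omega
    rw [PySem.List.pyRange_one_cons ha]
    simp only [aSearch]
    rw [if_pos (hall a (le_refl a) ha)]
    exact ih (a + 1) (by omega) (fun i h1 h2 => hall i (by omega) h2)

-- A's outer loop returns the first succeeding candidate
lemma aSearch_some (xs : List Int) :
    ∀ (c : Nat) (a m : Int), (m - a).toNat = c → a ≤ m → m < (xs.length : Int) →
    (∀ i : Int, a ≤ i → i < m → tankRun (rotList xs i) 0 < 0) →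
    ¬ tankRun (rotList xs m) 0 < 0 →
    aSearch xs (PySem.List.pyRange a (xs.length : Int) 1) = some m := by
  intro c
  induction c with
  | zero =>
    intro a m hc ham hm _ hok
    have : a = m := by omega
    subst this
    rw [PySem.List.pyRange_one_cons hm]
    simp only [aSearch]
    rw [if_neg hok]
  | succ c ih =>
    intro a m hc ham hm hfail hok
    have ha : a < m := by omega
    rw [PySem.List.pyRange_one_cons (by omega)]
    simp only [aSearch]
    rw [if_pos (hfail a (le_refl a) ha)]
    exact ih (a + 1) m (by omega) (by omega) hm (fun i h1 h2 => hfail i (by omega) h2) hok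

-- ===== VERDICT (by name: the statement is the Claim_ definition above) =====
-- xs.sum is the full prefix sum
lemma pref_length (xs : List Int) : pref xs xs.length = xs.sum := by
  simp [pref]

lemma pref_zero (xs : List Int) : pref xs 0 = 0 := by
  simp [pref]

-- a full rotation sums to the whole list's sum
lemma rot_sum (xs : List Int) (m : Nat) : (xs.drop m ++ xs.take m).sum = xs.sum := by
  rw [List.sum_append, drop_sum]
  simp [pref]

-- every candidate start fails when the total surplus is negative
lemma fail_of_total_neg (xs : List Int) (hS : xs.sum < 0) (i : Nat) (hi : i < xs.length) :
    tankRun (rotList xs (i : Int)) 0 < 0 := by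
  rw [rot_eq xs i hi]
  by_contra h
  have hiff := (tankRun_nonneg (xs.drop i ++ xs.take i) 0 (le_refl 0)).mp h
  have hlenr : (xs.drop i ++ xs.take i).length = xs.length := by simp; omega
  have := hiff (xs.drop i ++ xs.take i).length (le_refl _)
  rw [List.take_length, rot_sum] at this
  omega

-- starts before the first argmin fail
lemma fail_before_argmin (xs : List Int) (b : Nat) (hb : b ≤ xs.length)
    (hstrict : ∀ k < b, pref xs b < pref xs k) (i : Nat) (hi : i < b) :
    tankRun (rotList xs (i : Int)) 0 < 0 := by
  have hilt : i < xs.length := by omega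
  rw [rot_eq xs i hilt]
  by_contra h
  have hiff := (tankRun_nonneg (xs.drop i ++ xs.take i) 0 (le_refl 0)).mp h
  have := hiff (b - i) (by simp; omega)
  rw [rotsum_low xs (by omega) (by omega)] at this
  have hbi : i + (b - i) = b := by omega
  rw [hbi] at this
  have := hstrict i hi
  omega

-- the first argmin succeeds when the total surplus is nonnegative
lemma argmin_ok (xs : List Int) (b : Nat) (hxs : xs ≠ []) (hS : 0 ≤ xs.sum)
    (hb : b ≤ xs.length - 1) (hmin : ∀ k ≤ xs.length - 1, pref xs b ≤ pref xs k) :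
    ¬ tankRun (rotList xs (b : Int)) 0 < 0 := by
  have hn : 0 < xs.length := List.length_pos_of_ne_nil hxs
  rw [rot_eq xs b (by omega)]
  rw [tankRun_nonneg (xs.drop b ++ xs.take b) 0 (le_refl 0)]
  intro k hk
  have hk' : k ≤ xs.length := by
    simp only [List.length_append, List.length_drop, List.length_take] at hk
    omega
  simp only [zero_add]
  by_cases hcase : k ≤ xs.length - b
  · rw [rotsum_low xs (by omega) hcase]
    by_cases hend : b + k ≤ xs.length - 1
    · have := hmin (b + k) hend
      omega
    · have hbk : b + k = xs.length := by omega
      rw [hbk, pref_length]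
      have h0 := hmin 0 (by omega)
      rw [pref_zero] at h0
      omega
  · rw [rotsum_high xs (by omega) (by omega) hk']
    have ht : k - (xs.length - b) ≤ xs.length - 1 := by omega
    have := hmin (k - (xs.length - b)) ht
    omega

theorem validStartingCity_spec : Claim_equal_validStartingCity := by
  intro distances fuel mpg _ hpre
  unfold Pre_validStartingCity at hpre
  unfold Spec_validStartingCity
  have hfo := fo_eq distances fuel mpg hpre
  have hA : validStartingCity distances fuel mpg
      = aSearch ((distances.zip fuel).map (fun p => p.2 * mpg - p.1))
          (PySem.List.pyRange 0 ((((distances.zip fuel).map (fun p => p.2 * mpg - p.1)).length : Int)) 1) := by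
    simp only [validStartingCity]
    rw [hfo]
  set xs := (distances.zip fuel).map (fun p => p.2 * mpg - p.1) with hxs
  have hlen : xs.length = distances.length := by
    simp [hxs]
    omega
  by_cases hemp : distances = []
  · subst hemp
    simp only [validStartingCity_alt, if_pos]
    rw [hA]
    have : xs = [] := by simpa using List.length_eq_zero_iff.mp (by simp [hlen])
    rw [this]
    rfl
  · have hne : xs ≠ [] := by
      intro h
      apply hemp
      exact List.length_eq_zero_iff.mp (by rw [← hlen, h]; rfl)
    have hn : 0 < xs.length := List.length_pos_of_ne_nil hne
    simp only [validStartingCity_alt, if_neg hemp, ← hxs]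
    by_cases hS : xs.sum < 0
    · rw [if_pos hS, hA]
      apply aSearch_none xs xs.length 0 (by omega)
      intro i h1 h2
      have := fail_of_total_neg xs hS i.toNat (by omega)
      rwa [show ((i.toNat : Nat) : Int) = i by omega] at this
    · rw [if_neg hS, hA]
      obtain ⟨b, hstate, hble, hstrict, hmin⟩ := bScan_inv xs (xs.length - 1) (by omega)
      rw [hstate]
      apply aSearch_some xs b 0 (b : Int) (by omega) (by omega) (by omega)
      · intro i h1 h2
        have := fail_before_argmin xs b (by omega) hstrict i.toNat (by omega)
        rwa [show ((i.toNat : Nat) : Int) = i by omega] at this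
      · exact argmin_ok xs b hne (by omega) hble hmin
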